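-- pv_equiv track=rewrite | github.com/pypi-data/pypi-mirror-362 | packages/pygtrans/pygtrans-1.6.2.tar.gz/pygtrans-1.6.2/src/pygtrans/ApiKeyTranslate.py | split_list_by_content_size
-- ===== SOURCE A (Python) =====
-- import math
-- from typing import List, Union, Dict, overload
--
-- def split_list_by_content_size(
--     obj_list: List[str], content_size: int = 102400
-- ) -> List[List[str]]:
--     """..."""
--     if content_size < 1:
--         content_size = 1
--     if len(obj_list) == 1 or len("".join(obj_list)) <= content_size:
--         return [obj_list]
--
--     mid = math.ceil(len(obj_list) / 2)
--     ll = []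
--     ll.extend(split_list_by_content_size(obj_list[:mid], content_size=content_size))
--     ll.extend(split_list_by_content_size(obj_list[mid:], content_size=content_size))
--     return ll
-- ===== SOURCE B (Python) =====
-- def split_list_by_content_size(obj_list, content_size=102400):
--     if content_size < 1:
--         content_size = 1
--     if len(obj_list) == 1 or sum(map(len, obj_list)) <= content_size:
--         return [obj_list]
--     pre = [0]
--     acc = 0
--     for s in obj_list:
--         acc += len(s)
--         pre.append(acc)
--     out = []
--
--     def go(lo, hi):
--         if hi - lo == 1 or pre[hi] - pre[lo] <= content_size:
--             out.append(obj_list[lo:hi])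
--         else:
--             mid = lo + (hi - lo + 1) // 2
--             go(lo, mid)
--             go(mid, hi)
--
--     go(0, len(obj_list))
--     return out
-- ===== Notes on version B (the rewrite author's own statement) =====
-- stated objective: alternative
-- what changed: B precomputes prefix sums of string lengths once and recurses on index ranges with an O(1) range-sum check, instead of A's recursion on list slices that re-joins every sublist to measure it; slices are materialised only at the leaves (intended as faster; a timing run measured it between 1.0x and 1.5x, so no speed is claimed).
import Mathlib
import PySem

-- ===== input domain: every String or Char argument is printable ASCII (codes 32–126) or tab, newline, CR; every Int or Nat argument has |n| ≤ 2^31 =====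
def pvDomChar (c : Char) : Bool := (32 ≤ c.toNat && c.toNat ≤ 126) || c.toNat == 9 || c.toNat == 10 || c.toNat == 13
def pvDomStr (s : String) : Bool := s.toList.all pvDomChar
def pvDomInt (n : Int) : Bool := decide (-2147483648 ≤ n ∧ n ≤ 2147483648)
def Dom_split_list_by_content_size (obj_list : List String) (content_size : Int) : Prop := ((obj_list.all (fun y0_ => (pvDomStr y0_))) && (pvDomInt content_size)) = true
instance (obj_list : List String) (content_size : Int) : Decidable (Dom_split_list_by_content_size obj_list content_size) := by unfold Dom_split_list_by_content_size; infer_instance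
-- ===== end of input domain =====

-- B replaces A's join-and-measure recursion on list slices by one precomputed prefix-sum list
-- and a recursion on index ranges with an O(1) range-sum check (objective: alternative).

-- ===== PORT A =====
-- literal port of A: recursion on the list, re-measuring the joined slice at every call;
-- math.ceil(len/2) is ported exactly as (len + 1) / 2 (Nat), exact for all list lengths
def split_list_by_content_size (obj_list : List String) (content_size : Int) : List (List String) :=
  let cs : Int := if content_size < 1 then 1 else content_size
  if h : obj_list.length = 1 ∨ PySem.Str.len (PySem.Str.join "" obj_list) ≤ cs then
    [obj_list]
  else
    let mid : Nat := (obj_list.length + 1) / 2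
    split_list_by_content_size (PySem.List.slice obj_list none (some (mid : Int))) cs ++
      split_list_by_content_size (PySem.List.slice obj_list (some (mid : Int)) none) cs
termination_by obj_list.length
decreasing_by
  all_goals
    have hcs : (1 : Int) ≤ if content_size < 1 then 1 else content_size := by split_ifs <;> omega
    have hlen : 2 ≤ obj_list.length := by
      rcases obj_list with _ | ⟨a, _ | ⟨b, r⟩⟩
      · exact absurd (Or.inr (by
          have h0 : PySem.Str.len (PySem.Str.join "" ([] : List String)) = 0 := by decide
          rw [h0]; exact le_trans zero_le_one hcs)) h
      · exact absurd (Or.inl rfl) h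
      · simp
  · rw [PySem.List.slice_to_natCast]; simp; omega
  · rw [PySem.List.slice_from_natCast]; simp; omega

-- ===== PORT B =====
-- the inner recursion go(lo, hi) of Source B; the fuel argument only makes the recursion
-- structural (it is never exhausted on the call the port makes)
def pvGoB (obj_list : List String) (pre : List Int) (cs : Int) :
    Nat → Nat → Nat → List (List String) → List (List String)
  | _, _, 0, acc => acc
  | lo, hi, fuel + 1, acc =>
    if hi - lo = 1 ∨ PySem.List.pyGetD pre (hi : Int) 0 - PySem.List.pyGetD pre (lo : Int) 0 ≤ cs then
      acc ++ [PySem.List.slice obj_list (some (lo : Int)) (some (hi : Int))]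
    else
      let mid := lo + (hi - lo + 1) / 2
      pvGoB obj_list pre cs mid hi fuel (pvGoB obj_list pre cs lo mid fuel acc)

def split_list_by_content_size_alt (obj_list : List String) (content_size : Int) : List (List String) :=
  let cs : Int := if content_size < 1 then 1 else content_size
  if obj_list.length = 1 ∨ (obj_list.map PySem.Str.len).sum ≤ cs then [obj_list]
  else
    -- pre/acc loop of Source B, state (pre, acc)
    let st : List Int × Int :=
      obj_list.foldl (fun st s => (st.1 ++ [st.2 + PySem.Str.len s], st.2 + PySem.Str.len s)) ([0], 0)
    let pre : List Int := st.1
    pvGoB obj_list pre cs 0 obj_list.length (obj_list.length + 1) []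

-- ===== PRECONDITION & SPEC =====
def Spec_split_list_by_content_size (obj_list : List String) (content_size : Int) (out : List (List String)) : Prop := out = split_list_by_content_size_alt obj_list content_size
instance (obj_list : List String) (content_size : Int) (out : List (List String)) : Decidable (Spec_split_list_by_content_size obj_list content_size out) := by unfold Spec_split_list_by_content_size; infer_instance

-- ===== CLAIM (what is proved, stated in full; the proofs are below) =====
def Claim_equal_split_list_by_content_size : Prop := ∀ (obj_list : List String) (content_size : Int), Dom_split_list_by_content_size obj_list content_size → Spec_split_list_by_content_size obj_list content_size (split_list_by_content_size obj_list content_size)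

-- ===== LEMMAS AND PROOFS =====

-- length of the joined sublist equals the sum of the individual lengths
theorem pvJoinLenChars (ls : List (List Char)) :
    (PySem.Chars.join [] ls).length = (ls.map List.length).sum := by
  induction ls with
  | nil => simp [PySem.Chars.join_nil]
  | cons a t ih =>
    cases t with
    | nil => simp [PySem.Chars.join_singleton]
    | cons b r => rw [PySem.Chars.join_cons_cons]; simp at ih ⊢; omega

theorem pvJoinLen (l : List String) :
    PySem.Str.len (PySem.Str.join "" l) = ((l.map PySem.Str.len).sum : Int) := by
  rw [PySem.Str.len_eq, PySem.Str.toList_join]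
  have : ("" : String).toList = [] := rfl
  rw [this, pvJoinLenChars]
  induction l with
  | nil => simp
  | cons s t ih => simp [PySem.Str.len_eq] at ih ⊢; omega


-- prefix-sum list characterisation
def pvSumLen (l : List String) : Int := (l.map PySem.Str.len).sum

theorem pvPre_eq (xs : List String) :
    xs.foldl (fun st s => (st.1 ++ [st.2 + PySem.Str.len s], st.2 + PySem.Str.len s)) (([0], 0) : List Int × Int) =
      ((List.range (xs.length + 1)).map (fun i => pvSumLen (xs.take i)), pvSumLen xs) := by
  induction xs using List.reverseRecOn with
  | nil => simp [pvSumLen]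
  | append_singleton xs s ih =>
    rw [List.foldl_append, ih, List.foldl_cons, List.foldl_nil]
    simp only [List.length_append, List.length_singleton]
    rw [List.range_succ (n := xs.length + 1)]
    simp only [List.map_append, List.map_cons, List.map_nil]
    rw [Prod.mk.injEq]
    constructor
    · congr 1
      · exact List.map_congr_left fun i hi => by
          rw [List.take_append_of_le_length (by simp at hi; omega)]
      · simp [pvSumLen]
    · simp [pvSumLen]

theorem pvAunfold (seg : List String) (cs : Int) (hcs : 1 ≤ cs) :
    split_list_by_content_size seg cs =
      if seg.length = 1 ∨ pvSumLen seg ≤ cs then [seg]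
      else
        split_list_by_content_size (seg.take ((seg.length + 1) / 2)) cs ++
          split_list_by_content_size (seg.drop ((seg.length + 1) / 2)) cs := by
  rw [split_list_by_content_size.eq_def]
  simp only [if_neg (show ¬ cs < 1 by omega), pvJoinLen,
    PySem.List.slice_to_natCast, PySem.List.slice_from_natCast]
  split_ifs with h1 h2 h2 <;> first | rfl | (exact absurd h1 (by simpa [pvSumLen] using h2)) | (exact absurd h2 (by simpa [pvSumLen] using h1))

theorem pvMain (xs : List String) (cs : Int) (hcs : 1 ≤ cs) :
    ∀ size lo fuel acc, lo + size ≤ xs.length → size + 1 ≤ fuel →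
      pvGoB xs ((List.range (xs.length + 1)).map (fun i => pvSumLen (xs.take i))) cs
          lo (lo + size) fuel acc =
        acc ++ split_list_by_content_size ((xs.drop lo).take size) cs := by
  intro size
  induction size using Nat.strong_induction_on with
  | _ size ih =>
  intro lo fuel acc hle hfuel
  obtain ⟨f, rfl⟩ : ∃ f, fuel = f + 1 := ⟨fuel - 1, by omega⟩
  set seg := (xs.drop lo).take size with hseg
  have hseglen : seg.length = size := by simp [hseg]; omega
  have hget : ∀ i, i ≤ xs.length →
      PySem.List.pyGetD ((List.range (xs.length + 1)).map (fun i => pvSumLen (xs.take i))) (i : Int) 0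
        = pvSumLen (xs.take i) := by
    intro i hi
    rw [PySem.List.pyGetD_natCast]
    exact PySem.List.getD_map_range _ _ _ _ (by omega)
  have hdiff : pvSumLen (xs.take (lo + size)) - pvSumLen (xs.take lo) = pvSumLen seg := by
    rw [List.take_add, hseg]; simp [pvSumLen]
  have hAeq := pvAunfold seg cs hcs
  rw [pvGoB]
  rw [hget (lo + size) (by omega), hget lo (by omega), hdiff]
  by_cases hc : size = 1 ∨ pvSumLen seg ≤ cs
  · have hcnd : lo + size - lo = 1 ∨ pvSumLen seg ≤ cs := by
      rcases hc with h | h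
      · exact Or.inl (by omega)
      · exact Or.inr h
    rw [if_pos hcnd, hAeq, if_pos (by rw [hseglen]; exact hc)]
    have hcast : ((lo + size : Nat) : Int) = (lo : Int) + (size : Int) := by push_cast; ring
    rw [hcast, PySem.List.slice_natCast_add, hseg]
  · have hsz2 : 2 ≤ size := by
      rcases Nat.lt_or_ge size 2 with h | h
      · interval_cases size
        · exact absurd (Or.inr (by simp [hseg, pvSumLen]; omega)) hc
        · exact absurd (Or.inl rfl) hc
      · exact h
    rw [if_neg (fun hor => hc (hor.imp (fun h1 => by omega) id))]
    simp only []
    rw [hAeq, if_neg (by rw [hseglen]; exact hc)]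
    set m := (size + 1) / 2 with hm
    have hm1 : 1 ≤ m := by omega
    have hmlt : m ≤ size - 1 := by omega
    have hmid : lo + (lo + size - lo + 1) / 2 = lo + m := by omega
    have hL := ih m (by omega) lo f acc (by omega) (by omega)
    have hR := ih (size - m) (by omega) (lo + m) f (acc ++ split_list_by_content_size ((xs.drop lo).take m) cs) (by omega) (by omega)
    rw [hmid]
    rw [show lo + size = (lo + m) + (size - m) from by omega] at *
    rw [hL, hR]
    have hsegL : seg.take m = (xs.drop lo).take m := by
      rw [hseg, List.take_take]; congr 1; omega
    have hsegR : seg.drop m = (xs.drop (lo + m)).take (size - m) := by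
      rw [hseg, List.drop_take, List.drop_drop]
    rw [hseglen, hsegL, hsegR, List.append_assoc]

theorem pvA_clamp (xs : List String) (c : Int) :
    split_list_by_content_size xs c = split_list_by_content_size xs (if c < 1 then 1 else c) := by
  by_cases h : c < 1
  · rw [split_list_by_content_size.eq_def, split_list_by_content_size.eq_def]
    simp [h]
  · simp [h]

-- ===== VERDICT (by name: the statement is the Claim_ definition above) =====
theorem split_list_by_content_size_spec : Claim_equal_split_list_by_content_size := by
  intro xs c _
  unfold Spec_split_list_by_content_size
  simp only [split_list_by_content_size_alt]
  set k : Int := if c < 1 then 1 else c with hk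
  have hcs : (1 : Int) ≤ k := by rw [hk]; split_ifs <;> omega
  rw [pvA_clamp xs c, ← hk]
  by_cases hc : xs.length = 1 ∨ pvSumLen xs ≤ k
  · rw [if_pos (by simpa [pvSumLen] using hc), pvAunfold xs k hcs, if_pos hc]
  · rw [if_neg (by simpa [pvSumLen] using hc)]
    have hmain := pvMain xs k hcs xs.length 0 (xs.length + 1) [] (by omega) (by omega)
    simp only [Nat.zero_add, List.drop_zero, List.take_length, List.nil_append] at hmain
    rw [show (xs.foldl (fun st s => (st.1 ++ [st.2 + PySem.Str.len s], st.2 + PySem.Str.len s)) (([0], 0) : List Int × Int)).1 = (List.range (xs.length + 1)).map (fun i => pvSumLen (xs.take i)) from by rw [pvPre_eq]]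
    exact hmain.symm
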